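-- pv_equiv track=rewrite | github.com/instill-ai/component | operator/document/v0/python/transformPDFToMarkdown.py | transform_table_markdown
-- ===== SOURCE A (Python) =====
-- def transform_table_markdown(table):
-- 	result = ""
-- 	texts = table["text"]
-- 	for i, row in enumerate(texts):
-- 		for j, col in enumerate(row):
-- 			if col:
-- 				if "\n" in col:
-- 					col = col.replace("\n", "<br>")
-- 				result += col
--
-- 				if j < len(row) - 1:
-- 					result += " | "
-- 			else:
-- 				if j == 0:
-- 					result += "||"
-- 				else:
-- 					result += "|"
-- 		if i == 0:
-- 			result += "\n"
-- 			## TODO: Judge table that cross the page,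
-- 			result += "|"
-- 			result += " --- |" * len(row)
-- 			result += "\n"
-- 		elif i < len(texts) - 1:
-- 			result += "\n"
--
-- 	return result
-- ===== SOURCE B (Python) =====
-- def _cells(cells, first):
--     # index-free recursion: 'first' replaces j==0, emptiness of the tail replaces j<len-1
--     if not cells:
--         return ""
--     c, rest = cells[0], cells[1:]
--     if c:
--         tok = c.replace("\n", "<br>") + (" | " if rest else "")
--     else:
--         tok = "||" if first else "|"
--     return tok + _cells(rest, False)
--
--
-- def _rows(rows, first):
--     if not rows:
--         return ""
--     r, rest = rows[0], rows[1:]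
--     s = _cells(r, True)
--     if first:
--         return s + "\n|" + " --- |" * len(r) + "\n" + _rows(rest, False)
--     return s + ("\n" if rest else "") + _rows(rest, False)
--
--
-- def transform_table_markdown(table):
--     return _rows(table["text"], True)
-- ===== Notes on version B (the rewrite author's own statement) =====
-- stated objective: alternative
-- what changed: A iterates with enumerate over rows and cells, threading a mutable result string and deciding separators from indices (j==0, j<len(row)-1, i==0, i<len(texts)-1); B is index-free structural recursion on the lists, deciding each separator from a first-flag and the emptiness of the remaining tail.
import Mathlib
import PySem

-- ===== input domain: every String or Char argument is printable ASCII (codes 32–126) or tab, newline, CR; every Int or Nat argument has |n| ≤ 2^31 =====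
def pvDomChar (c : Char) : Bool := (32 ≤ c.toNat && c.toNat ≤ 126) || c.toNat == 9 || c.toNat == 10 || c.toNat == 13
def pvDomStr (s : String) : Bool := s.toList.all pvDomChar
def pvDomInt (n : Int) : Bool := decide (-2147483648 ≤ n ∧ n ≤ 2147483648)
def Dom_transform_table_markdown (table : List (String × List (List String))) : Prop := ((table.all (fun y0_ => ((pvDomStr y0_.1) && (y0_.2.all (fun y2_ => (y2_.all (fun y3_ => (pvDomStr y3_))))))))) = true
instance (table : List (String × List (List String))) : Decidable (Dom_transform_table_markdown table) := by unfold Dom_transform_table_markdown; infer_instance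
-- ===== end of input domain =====

-- B replaces A's enumerate/index bookkeeping with index-free structural recursion
-- over the rows and cells (objective: alternative decomposition, same cost).

-- shared primitive: Python's string repetition  s * n
def strRep (s : String) (n : Nat) : String :=
  match n with
  | 0 => ""
  | Nat.succ m => s ++ strRep s m

-- ===== PORT A =====
def stepCellA (rowLen : Nat) (result : String) (jc : Int × String) : String :=
  if jc.2 ≠ "" then
    let col := if PySem.Str.isIn "\n" jc.2 then PySem.Str.replace jc.2 "\n" "<br>" else jc.2
    let result := result ++ col
    if jc.1 < (rowLen : Int) - 1 then result ++ " | " else result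
  else
    if jc.1 = 0 then result ++ "||" else result ++ "|"

def stepRowA (n : Nat) (result : String) (ir : Int × List String) : String :=
  let result := (PySem.List.enumerate ir.2).foldl (stepCellA ir.2.length) result
  if ir.1 = 0 then
    result ++ "\n" ++ "|" ++ strRep " --- |" ir.2.length ++ "\n"
  else if ir.1 < (n : Int) - 1 then result ++ "\n"
  else result

def transform_table_markdown (table : List (String × List (List String))) : String :=
  match (PySem.Dict.mk table).get? "text" with
  | none => ""   -- Python raises KeyError here; excluded by Pre_
  | some texts => (PySem.List.enumerate texts).foldl (stepRowA texts.length) ""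

-- ===== PORT B =====
def cellsB : List String → Bool → String
  | [], _ => ""
  | c :: rest, first =>
    (if c ≠ "" then
        PySem.Str.replace c "\n" "<br>" ++ (if rest.isEmpty then "" else " | ")
      else if first then "||" else "|") ++ cellsB rest false

def rowsB : List (List String) → Bool → String
  | [], _ => ""
  | r :: rest, first =>
    let s := cellsB r true
    if first then
      s ++ "\n|" ++ strRep " --- |" r.length ++ "\n" ++ rowsB rest false
    else
      s ++ (if rest.isEmpty then "" else "\n") ++ rowsB rest false

def transform_table_markdown_alt (table : List (String × List (List String))) : String :=
  match (PySem.Dict.mk table).get? "text" with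
  | none => ""   -- Python raises KeyError here; excluded by Pre_
  | some texts => rowsB texts true

-- ===== PRECONDITION & SPEC =====
-- Pre_ excludes only tables without a "text" key, on which the Python A raises KeyError.
def Pre_transform_table_markdown (table : List (String × List (List String))) : Prop :=
  "text" ∈ table.map Prod.fst
instance (table : List (String × List (List String))) : Decidable (Pre_transform_table_markdown table) := by
  unfold Pre_transform_table_markdown; infer_instance

def pvWitness_transform_table_markdown : (List (String × List (List String))) :=
  [("text", [["a", "b"], ["c", ""]])]

def Spec_transform_table_markdown (table : List (String × List (List String))) (out : String) : Prop :=
  out = transform_table_markdown_alt table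
instance (table : List (String × List (List String))) (out : String) : Decidable (Spec_transform_table_markdown table out) := by
  unfold Spec_transform_table_markdown; infer_instance

-- ===== CLAIM (what is proved, stated in full; the proofs are below) =====
def Claim_equal_transform_table_markdown : Prop := ∀ (table : List (String × List (List String))), Dom_transform_table_markdown table → Pre_transform_table_markdown table → Spec_transform_table_markdown table (transform_table_markdown table)

-- ===== LEMMAS AND PROOFS =====

-- replace on a string the pattern does not occur in is the identity
theorem replace_go_of_not_infix (old nw : List Char) :
    ∀ (fuel : Nat) (l acc : List Char), ¬ old <:+: l →
      PySem.Chars.replace.go old nw fuel l acc = acc.reverse ++ l := by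
  intro fuel
  induction fuel with
  | zero => intro l acc _; rfl
  | succ m ih =>
    intro l acc h
    cases l with
    | nil => simp [PySem.Chars.replace.go]
    | cons c t =>
      have hpre : old.isPrefixOf (c :: t) = false := by
        rw [Bool.eq_false_iff]
        intro hp
        exact h (List.IsPrefix.isInfix (List.isPrefixOf_iff_prefix.mp hp))
      have ht : ¬ old <:+: t := fun hi => h (List.infix_cons hi)
      rw [PySem.Chars.replace.go]
      simp [hpre, ih t (c :: acc) ht]

-- A checks `"\n" in col` before replacing, B replaces unconditionally: same value
theorem replace_noop (s : String) (h : PySem.Str.isIn "\n" s = false) :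
    PySem.Str.replace s "\n" "<br>" = s := by
  have hi : ¬ (['\n'] <:+: s.toList) := by
    rw [← PySem.Chars.isIn_eq_false_iff]
    simpa using h
  rw [PySem.Str.replace, PySem.Chars.replace]
  simp [replace_go_of_not_infix ['\n'] ['<','b','r','>'] _ _ _ hi, String.ofList_toList]

-- A's inner loop at position i renders B's recursive cell string for the suffix
theorem cells_fold (n : Nat) :
    ∀ (l : List String) (i : Int) (acc : String), 0 ≤ i → i + l.length = (n : Int) →
      (PySem.List.enumerate l i).foldl (stepCellA n) acc
        = acc ++ cellsB l (decide (i = 0)) := by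
  intro l
  induction l with
  | nil => intro i acc _ _; simp [PySem.List.enumerate, cellsB]
  | cons c rest ih =>
    intro i acc h0 hn
    rw [PySem.List.enumerate_cons, List.foldl_cons]
    have hstep : stepCellA n acc (i, c)
        = acc ++ (if c ≠ "" then
            PySem.Str.replace c "\n" "<br>" ++ (if rest.isEmpty then "" else " | ")
          else if i = 0 then "||" else "|") := by
      unfold stepCellA
      by_cases hne : c = ""
      · by_cases hj : i = 0 <;> simp [hne, hj]
      · have hlt : (i < (n : Int) - 1) ↔ ¬ rest.isEmpty := by
          cases rest <;> simp at hn ⊢ <;> omega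
        have hcol : (if PySem.Str.isIn "\n" c = true then PySem.Str.replace c "\n" "<br>" else c)
            = PySem.Str.replace c "\n" "<br>" := by
          by_cases hin : PySem.Str.isIn "\n" c = true
          · simp only [hin, if_true]
          · rw [Bool.not_eq_true] at hin
            simp only [hin, Bool.false_eq_true, if_false, replace_noop c hin]
        by_cases hr : rest.isEmpty <;>
          simp only [ne_eq, hne, not_false_eq_true, hcol, hlt, hr, not_true,
            Bool.not_eq_true, String.append_assoc, String.append_empty,
            if_neg, if_pos]
    rw [hstep, ih (i + 1) _ (by omega) (by simp at hn ⊢; omega)]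
    have h1 : decide (i + 1 = 0) = false := by simp; omega
    conv_rhs => rw [cellsB]
    rw [h1, String.append_assoc]
    simp

-- A's outer loop over the rows after the first renders B's recursive tail
theorem rows_fold (n : Nat) :
    ∀ (rs : List (List String)) (i : Int) (acc : String), 1 ≤ i → i + rs.length = (n : Int) →
      (PySem.List.enumerate rs i).foldl (stepRowA n) acc = acc ++ rowsB rs false := by
  intro rs
  induction rs with
  | nil => intro i acc _ _; simp [PySem.List.enumerate, rowsB]
  | cons r rest ih =>
    intro i acc h1 hn
    rw [PySem.List.enumerate_cons, List.foldl_cons]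
    have hi0 : ¬ (i = 0) := by omega
    have hrow := cells_fold r.length r 0 acc (by omega) (by simp)
    have hstep : stepRowA n acc (i, r)
        = acc ++ (cellsB r true ++ (if rest.isEmpty then "" else "\n")) := by
      unfold stepRowA
      simp only [hi0, if_false]
      rw [hrow]
      have hlt : (i < (n : Int) - 1) ↔ ¬ rest.isEmpty := by
        cases rest <;> simp at hn ⊢ <;> omega
      by_cases hr : rest.isEmpty <;> simp [hlt, hr, String.append_assoc]
    rw [hstep, ih (i + 1) _ (by omega) (by simp at hn ⊢; omega)]
    conv_rhs => rw [rowsB]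
    simp [String.append_assoc]

-- Pre_ gives the "text" lookup a value
theorem get?_text_isSome (table : List (String × List (List String)))
    (h : Pre_transform_table_markdown table) :
    ∃ v, (PySem.Dict.mk table).get? "text" = some v := by
  unfold Pre_transform_table_markdown at h
  induction table with
  | nil => simp at h
  | cons kv t ih =>
    rw [PySem.Dict.get?_mk_cons]
    by_cases hk : kv.1 == "text"
    · simp [hk]
    · simp only [hk, if_neg, Bool.false_eq_true, not_false_iff]
      apply ih
      simp only [List.map_cons, List.mem_cons] at h
      rcases h with h | h
      · exact absurd h.symm (by simpa using hk)
      · exact h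

-- ===== VERDICT (by name: the statement is the Claim_ definition above) =====
theorem transform_table_markdown_spec : Claim_equal_transform_table_markdown := by
  intro table _ hpre
  unfold Spec_transform_table_markdown transform_table_markdown transform_table_markdown_alt
  obtain ⟨texts, hget⟩ := get?_text_isSome table hpre
  rw [hget]
  cases texts with
  | nil => simp [PySem.List.enumerate, rowsB]
  | cons r0 rest =>
    dsimp only
    rw [PySem.List.enumerate_cons, List.foldl_cons]
    have hrow := cells_fold r0.length r0 0 "" (by omega) (by simp)
    have hstep0 : stepRowA (r0 :: rest).length "" (0, r0)
        = cellsB r0 true ++ "\n" ++ "|" ++ strRep " --- |" r0.length ++ "\n" := by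
      unfold stepRowA
      rw [hrow]; simp
    rw [hstep0, zero_add,
      rows_fold _ rest 1 _ (by omega) (by simp only [List.length_cons]; push_cast; omega)]
    conv_rhs => rw [rowsB]
    simp [String.append_assoc]
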